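-- pv_equiv track=rewrite | github.com/Xera-phix/kpi-automation | streamlit_app/app.py | find_task
-- ===== SOURCE A (Python) =====
-- def find_task(projects: list, task_query: str, resource_query: str = None) -> dict:
--     """Find a task by fuzzy matching."""
--     task_query_lower = task_query.lower()
--
--     matches = []
--     for project in projects:
--         task_name = project.get("task", "").lower()
--         resource_name = project.get("resource", "").lower()
--
--         if task_query_lower in task_name or task_name in task_query_lower:
--             if resource_query:
--                 if resource_query.lower() in resource_name:
--                     matches.append(project)
--             else:
--                 matches.append(project)
--
--     if matches:
--         return min(matches, key=lambda x: len(x.get("task", "")))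
--     return None
-- ===== SOURCE B (Python) =====
-- def find_task(projects: list, task_query: str, resource_query: str = None) -> dict:
--     """Find a task by fuzzy matching: stable-sort by task-name length, return the
--     first qualifying project (stability reproduces min's first-minimum tie rule)."""
--     tq = task_query.lower()
--     for project in sorted(projects, key=lambda p: len(p.get("task", ""))):
--         name = project.get("task", "").lower()
--         if tq in name or name in tq:
--             if not resource_query or resource_query.lower() in project.get("resource", "").lower():
--                 return project
--     return None
-- ===== Notes on version B (the rewrite author's own statement) =====
-- stated objective: alternative
-- what changed: Replaces filter-all-matches-then-min() with sort-then-scan: stable-sort the projects by task-name length once and return the first project that passes the fuzzy/resource test (stability yields min's first-minimum tie-breaking).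
import Mathlib
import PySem

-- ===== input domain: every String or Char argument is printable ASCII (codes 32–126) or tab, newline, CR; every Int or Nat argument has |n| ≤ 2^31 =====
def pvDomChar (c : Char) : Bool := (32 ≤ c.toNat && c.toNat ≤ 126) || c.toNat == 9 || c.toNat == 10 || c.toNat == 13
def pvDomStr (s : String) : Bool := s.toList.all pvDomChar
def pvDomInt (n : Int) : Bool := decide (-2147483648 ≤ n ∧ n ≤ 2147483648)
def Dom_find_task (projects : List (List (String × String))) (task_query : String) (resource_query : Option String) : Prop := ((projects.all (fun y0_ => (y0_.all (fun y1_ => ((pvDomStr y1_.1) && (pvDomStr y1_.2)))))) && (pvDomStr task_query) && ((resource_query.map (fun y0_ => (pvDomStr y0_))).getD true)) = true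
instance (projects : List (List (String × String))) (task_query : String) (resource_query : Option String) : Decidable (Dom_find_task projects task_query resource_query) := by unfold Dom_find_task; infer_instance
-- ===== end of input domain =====

-- B replaces A's collect-all-matches-then-min() with sort-then-scan: stable-sort the
-- projects by task-name length once, then return the first qualifying one; objective: alternative.

-- project.get(k, dflt) on an association list: first matching key, else the default (exact for Python dicts, whose keys are unique)
def pyGetStr (d : List (String × String)) (k dflt : String) : String :=
  match d.find? (fun kv => kv.1 == k) with
  | some kv => kv.2
  | none => dflt

-- ===== PORT A =====
def find_task (projects : List (List (String × String))) (task_query : String) (resource_query : Option String) : Option (List (String × String)) :=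
  let task_query_lower := PySem.Str.lower task_query
  let matchesA := projects.foldl (fun ms project =>
    let task_name := PySem.Str.lower (pyGetStr project "task" "")
    let resource_name := PySem.Str.lower (pyGetStr project "resource" "")
    if PySem.Str.isIn task_query_lower task_name || PySem.Str.isIn task_name task_query_lower then
      match resource_query with
      | some r =>  -- 'if resource_query:' — falsy for None and ""
        if r ≠ "" then
          if PySem.Str.isIn (PySem.Str.lower r) resource_name then ms ++ [project] else ms
        else ms ++ [project]
      | none => ms ++ [project]
    else ms) []
  if matchesA ≠ [] then
    PySem.List.min? matchesA (fun x => PySem.Str.len (pyGetStr x "task" ""))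
  else none

-- ===== PORT B =====
def find_task_alt (projects : List (List (String × String))) (task_query : String) (resource_query : Option String) : Option (List (String × String)) :=
  let tq := PySem.Str.lower task_query
  (PySem.List.sorted projects (fun p => PySem.Str.len (pyGetStr p "task" ""))).find? (fun project =>
    let name := PySem.Str.lower (pyGetStr project "task" "")
    (PySem.Str.isIn tq name || PySem.Str.isIn name tq) &&
    (match resource_query with  -- 'not resource_query or …' — None and "" are falsy
     | some r => if r ≠ "" then PySem.Str.isIn (PySem.Str.lower r) (PySem.Str.lower (pyGetStr project "resource" "")) else true
     | none => true))

-- ===== PRECONDITION & SPEC =====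
def Spec_find_task (projects : List (List (String × String))) (task_query : String) (resource_query : Option String) (out : Option (List (String × String))) : Prop := out = find_task_alt projects task_query resource_query
instance (projects : List (List (String × String))) (task_query : String) (resource_query : Option String) (out : Option (List (String × String))) : Decidable (Spec_find_task projects task_query resource_query out) := by unfold Spec_find_task; infer_instance

-- ===== CLAIM (what is proved, stated in full; the proofs are below) =====
def Claim_equal_find_task : Prop := ∀ (projects : List (List (String × String))) (task_query : String) (resource_query : Option String), Dom_find_task projects task_query resource_query → Spec_find_task projects task_query resource_query (find_task projects task_query resource_query)

-- ===== LEMMAS AND PROOFS =====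

-- the common per-project qualification predicate
def pvQual (task_query : String) (resource_query : Option String) (project : List (String × String)) : Bool :=
  (PySem.Str.isIn (PySem.Str.lower task_query) (PySem.Str.lower (pyGetStr project "task" "")) ||
   PySem.Str.isIn (PySem.Str.lower (pyGetStr project "task" "")) (PySem.Str.lower task_query)) &&
  (match resource_query with
   | some r => if r ≠ "" then PySem.Str.isIn (PySem.Str.lower r) (PySem.Str.lower (pyGetStr project "resource" "")) else true
   | none => true)

def pvKey (x : List (String × String)) : Int := PySem.Str.len (pyGetStr x "task" "")

-- the insertion operation of PySem.List.sorted, specialised to a key into Int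
def pvIns {α : Type} (key : α → Int) (x : α) (ys : List α) : List α :=
  PySem.List.insertBy (fun a b => decide (key a < key b)) x ys

theorem pv_insertBy_all_lt {α : Type} (key : α → Int) (x : α) (l : List α)
    (h : ∀ z ∈ l, key x < key z) : pvIns key x l = x :: l := by
  cases l with
  | nil => rfl
  | cons z t =>
    have := h z (by simp)
    simp [pvIns, PySem.List.insertBy, this]

theorem pv_insertBy_pairwise {α : Type} (key : α → Int) (x : α) (ys : List α)
    (h : ys.Pairwise (fun a b => key a ≤ key b)) :
    (pvIns key x ys).Pairwise (fun a b => key a ≤ key b) := by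
  induction ys with
  | nil => simp [pvIns, PySem.List.insertBy]
  | cons y t ih =>
    rcases List.pairwise_cons.1 h with ⟨hy, ht⟩
    by_cases hlt : key x < key y
    · simp only [pvIns, PySem.List.insertBy, hlt, decide_true, if_pos]
      exact List.pairwise_cons.2 ⟨by
        intro z hz
        rcases List.mem_cons.1 hz with rfl | hz
        · exact le_of_lt hlt
        · exact le_trans (le_of_lt hlt) (hy z hz), h⟩
    · simp only [pvIns, PySem.List.insertBy, hlt, decide_false, Bool.false_eq_true, if_neg,
        not_false_iff]
      refine List.pairwise_cons.2 ⟨?_, ih ht⟩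
      intro z hz
      have hz' : z = x ∨ z ∈ t := by
        have := (PySem.List.mem_insertBy (before := fun a b => decide (key a < key b))
          (x := x) (ys := t) (y := z)).1 hz
        exact this
      rcases hz' with rfl | hz'
      · exact le_of_not_gt hlt
      · exact hy z hz'

theorem pv_filter_insertBy {α : Type} (key : α → Int) (q : α → Bool) (x : α) (ys : List α)
    (h : ys.Pairwise (fun a b => key a ≤ key b)) :
    (pvIns key x ys).filter q = if q x then pvIns key x (ys.filter q) else ys.filter q := by
  induction ys with
  | nil => cases hqx : q x <;> simp [pvIns, PySem.List.insertBy, hqx]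
  | cons y t ih =>
    rcases List.pairwise_cons.1 h with ⟨hy, ht⟩
    by_cases hlt : key x < key y
    · simp only [pvIns, PySem.List.insertBy, hlt, decide_true, if_pos]
      cases hqx : q x with
      | false => cases hqy : q y <;> simp [List.filter, hqx, hqy]
      | true =>
        cases hqy : q y with
        | true => simp [List.filter, hqx, hqy, PySem.List.insertBy, hlt]
        | false =>
          have hall : ∀ z ∈ t.filter q, key x < key z := by
            intro z hz
            exact lt_of_lt_of_le hlt (hy z (List.mem_of_mem_filter hz))
          simp only [List.filter, hqx, hqy, if_true]
          exact (pv_insertBy_all_lt key x _ hall).symm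
    · simp only [pvIns, PySem.List.insertBy, hlt, decide_false, Bool.false_eq_true, if_neg,
        not_false_iff]
      cases hqy : q y with
      | true =>
        simp only [List.filter, hqy]
        rw [show PySem.List.insertBy (fun a b => decide (key a < key b)) x t = pvIns key x t from rfl,
          ih ht]
        cases q x with
        | false => simp
        | true => simp [pvIns, PySem.List.insertBy, hlt]
      | false =>
        simp only [List.filter, hqy]
        rw [show PySem.List.insertBy (fun a b => decide (key a < key b)) x t = pvIns key x t from rfl,
          ih ht]
        cases q x with
        | false => simp
        | true => simp [pvIns]

-- filter commutes with the insertion-sort fold (stability)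
theorem pv_filter_foldl_ins {α : Type} (key : α → Int) (q : α → Bool) :
    ∀ (t acc : List α), acc.Pairwise (fun a b => key a ≤ key b) →
    (t.foldl (fun a x => pvIns key x a) acc).filter q
      = (t.filter q).foldl (fun a x => pvIns key x a) (acc.filter q) := by
  intro t
  induction t with
  | nil => intro acc _; rfl
  | cons x t ih =>
    intro acc hacc
    simp only [List.foldl_cons, List.filter]
    cases hqx : q x with
    | true =>
      rw [ih _ (pv_insertBy_pairwise key x acc hacc), pv_filter_insertBy key q x acc hacc, hqx]
      simp
    | false =>
      rw [ih _ (pv_insertBy_pairwise key x acc hacc), pv_filter_insertBy key q x acc hacc, hqx]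
      simp

-- the head of the insertion-sort fold evolves exactly like min?'s accumulator
theorem pv_head_foldl_ins {α : Type} (key : α → Int) :
    ∀ (t acc : List α),
    (t.foldl (fun a x => pvIns key x a) acc).head?
      = t.foldl (fun m x => match m with
          | none => some x
          | some m => if key x < key m then some x else some m) acc.head? := by
  intro t
  induction t with
  | nil => intro acc; rfl
  | cons x t ih =>
    intro acc
    simp only [List.foldl_cons]
    rw [ih]
    congr 1
    cases acc with
    | nil => rfl
    | cons y ys =>
      by_cases hlt : key x < key y <;> simp [pvIns, PySem.List.insertBy, hlt]

-- sort-then-scan computes min-of-filter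
theorem pv_find_sorted {α : Type} (key : α → Int) (q : α → Bool) (xs : List α) :
    (PySem.List.sorted xs key).find? q = PySem.List.min? (xs.filter q) key := by
  have hsorted : PySem.List.sorted xs key = xs.foldl (fun a x => pvIns key x a) [] := rfl
  rw [← List.head?_filter, hsorted,
    pv_filter_foldl_ins key q xs [] (by simp), pv_head_foldl_ins]
  rfl

theorem find_task_eq (projects : List (List (String × String))) (task_query : String) (resource_query : Option String) :
    find_task projects task_query resource_query = find_task_alt projects task_query resource_query := by
  have hA : find_task projects task_query resource_query
      = PySem.List.min? ((projects.filter (pvQual task_query resource_query))) pvKey := by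
    unfold find_task
    have hbody : (fun (ms : List (List (String × String))) project =>
        let task_name := PySem.Str.lower (pyGetStr project "task" "")
        let resource_name := PySem.Str.lower (pyGetStr project "resource" "")
        if PySem.Str.isIn (PySem.Str.lower task_query) task_name || PySem.Str.isIn task_name (PySem.Str.lower task_query) then
          match resource_query with
          | some r =>
            if r ≠ "" then
              if PySem.Str.isIn (PySem.Str.lower r) resource_name then ms ++ [project] else ms
            else ms ++ [project]
          | none => ms ++ [project]
        else ms)
        = (fun ms p => if pvQual task_query resource_query p then ms ++ [p] else ms) := by
      funext ms p
      unfold pvQual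
      cases resource_query with
      | none => dsimp only; split_ifs <;> simp_all
      | some r => dsimp only; split_ifs <;> simp_all
    simp only [hbody, PySem.List.foldl_append_if, List.nil_append, List.map_id']
    split_ifs with h
    · rfl
    · push Not at h
      simp [h, PySem.List.min?]
  have hB : find_task_alt projects task_query resource_query
      = (PySem.List.sorted projects pvKey).find? (pvQual task_query resource_query) := by
    unfold find_task_alt
    rfl
  rw [hA, hB, pv_find_sorted]

-- ===== VERDICT (by name: the statement is the Claim_ definition above) =====
theorem find_task_spec : Claim_equal_find_task := by
  intro projects task_query resource_query _
  unfold Spec_find_task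
  exact find_task_eq projects task_query resource_query
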